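-- pv_equiv track=rewrite | github.com/knonode/TheValidathor | rand_calculation.py | find_valid_sequences
-- ===== SOURCE A (Python) =====
-- def find_valid_sequences(triangle):
--     valid_lengths = [3, 7, 11, 13]
--     unique_sequences = set()
--
--     # For each row
--     for row_idx, row in enumerate(triangle):
--         # For each position in row
--         for col_idx in range(len(row)):
--             # For each valid sequence length
--             for length in valid_lengths:
--                 # Try to build sequences starting from this position
--                 current_row = 76 - row_idx  # Convert triangle index to actual row number
--                 sequences = build_sequences(current_row, length, set())
--                 for seq in sequences:
--                     # Convert sequence to string for uniqueness check
--                     seq_str = ''.join(map(str, sorted(seq)))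
--                     unique_sequences.add(seq_str)
--
--     return unique_sequences
--
-- def build_sequences(start_row, length, used):
--     if length == 1:
--         return [[start_row]]
--
--     sequences = []
--     # Try both up and down
--     for next_row in [start_row + 1, start_row - 1]:
--         if 0 <= next_row <= 76 and next_row not in used:
--             new_used = used | {start_row}
--             sub_sequences = build_sequences(next_row, length - 1, new_used)
--             for sub_seq in sub_sequences:
--                 sequences.append([start_row] + sub_seq)
--
--     return sequences
-- ===== SOURCE B (Python) =====
-- def find_valid_sequences(triangle):
--     # The self-avoiding +/-1 walk is forced monotone: from its starting row it can
--     # only climb or descend through consecutive rows, and it checks every row it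
--     # steps onto against the board (0..76), the starting row being given.  So each
--     # non-empty row contributes at most two runs per length; emit them directly.
--     unique_sequences = set()
--     for row_idx, row in enumerate(triangle):
--         if not row:
--             continue
--         start = 76 - row_idx
--         for length in (3, 7, 11, 13):
--             up = range(start, start + length)
--             if all(0 <= r <= 76 for r in up[1:]):
--                 unique_sequences.add(''.join(map(str, up)))
--             down = range(start - length + 1, start + 1)
--             if all(0 <= r <= 76 for r in down[:-1]):
--                 unique_sequences.add(''.join(map(str, down)))
--     return unique_sequences
-- ===== Notes on version B (the rewrite author's own statement) =====
-- stated objective: faster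
-- what changed: B replaces A's recursive self-avoiding +-1 walk search (re-run once per column and deduplicated through sorting) by direct emission of the only two runs that walk can produce per non-empty row - the ascending run range(start, start+L) and the descending run range(start-L+1, start+1), each kept when every row the walk steps onto lies on the board 0..76 - dropping the column loop, the recursion and the per-sequence sort entirely.
import Mathlib
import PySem

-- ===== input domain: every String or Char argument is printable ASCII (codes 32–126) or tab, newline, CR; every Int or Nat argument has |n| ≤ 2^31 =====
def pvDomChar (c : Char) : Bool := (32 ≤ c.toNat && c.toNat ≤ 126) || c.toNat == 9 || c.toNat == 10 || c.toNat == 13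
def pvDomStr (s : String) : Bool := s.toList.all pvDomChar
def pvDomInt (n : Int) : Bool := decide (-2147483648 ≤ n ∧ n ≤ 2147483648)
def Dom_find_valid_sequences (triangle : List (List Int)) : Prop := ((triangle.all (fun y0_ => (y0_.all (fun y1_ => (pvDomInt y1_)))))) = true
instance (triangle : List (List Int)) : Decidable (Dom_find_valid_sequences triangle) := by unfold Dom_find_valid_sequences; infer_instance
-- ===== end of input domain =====

-- B replaces the recursive self-avoiding-walk search (repeated per column) by direct
-- emission of the provably forced consecutive up/down runs, once per non-empty row;
-- objective: faster (drops the per-column repetition, the recursion and the sort).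

-- ===== PORT A =====
-- recursion is on the length argument (a Nat here: A only ever passes the
-- positive literals 3, 7, 11, 13, counting down to 1); the 0 arm is unreachable
def build_sequences (start_row : Int) (length : Nat) (used : PySem.Set Int) : List (List Int) :=
  match length with
  | 0 => []   -- unreachable: every call in A has length ≥ 1
  | 1 => [[start_row]]
  | Nat.succ (Nat.succ n) =>
      -- for next_row in [start_row + 1, start_row - 1]
      let up :=
        if 0 ≤ start_row + 1 ∧ start_row + 1 ≤ 76 ∧ (start_row + 1) ∉ used then
          (build_sequences (start_row + 1) (n + 1) (PySem.Set.add used start_row)).map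
            (fun sub_seq => start_row :: sub_seq)
        else []
      let down :=
        if 0 ≤ start_row - 1 ∧ start_row - 1 ≤ 76 ∧ (start_row - 1) ∉ used then
          (build_sequences (start_row - 1) (n + 1) (PySem.Set.add used start_row)).map
            (fun sub_seq => start_row :: sub_seq)
        else []
      up ++ down

def find_valid_sequences (triangle : List (List Int)) : List String :=
  let valid_lengths : List Nat := [3, 7, 11, 13]
  (PySem.List.enumerate triangle).foldl
    (fun unique_sequences p =>
      (PySem.List.pyRange 0 (p.2.length : Int) 1).foldl
        (fun unique_sequences _col_idx =>
          valid_lengths.foldl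
            (fun unique_sequences length =>
              let current_row := 76 - p.1
              (build_sequences current_row length PySem.Set.empty).foldl
                (fun unique_sequences seq =>
                  PySem.Set.add unique_sequences
                    (PySem.Str.join ""
                      ((PySem.List.sorted seq (fun x => x) false).map PySem.Int.toStr)))
                unique_sequences)
            unique_sequences)
        unique_sequences)
    PySem.Set.empty

-- ===== PORT B =====
def find_valid_sequences_alt (triangle : List (List Int)) : List String :=
  (PySem.List.enumerate triangle).foldl
    (fun acc p =>
      if p.2 = [] then acc
      else
        let start : Int := 76 - p.1
        ([3, 7, 11, 13] : List Int).foldl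
          (fun acc length =>
            let up := PySem.List.pyRange start (start + length) 1
            let acc1 :=
              if (PySem.List.slice up (some 1) none).all
                  (fun r => decide (0 ≤ r) && decide (r ≤ 76)) then
                PySem.Set.add acc (PySem.Str.join "" (up.map PySem.Int.toStr))
              else acc
            let down := PySem.List.pyRange (start - length + 1) (start + 1) 1
            if (PySem.List.slice down none (some (-1))).all
                (fun r => decide (0 ≤ r) && decide (r ≤ 76)) then
              PySem.Set.add acc1 (PySem.Str.join "" (down.map PySem.Int.toStr))
            else acc1)
          acc)
    PySem.Set.empty

-- ===== PRECONDITION & SPEC =====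
def Spec_find_valid_sequences (triangle : List (List Int)) (out : List String) : Prop := out = find_valid_sequences_alt triangle
instance (triangle : List (List Int)) (out : List String) : Decidable (Spec_find_valid_sequences triangle out) := by unfold Spec_find_valid_sequences; infer_instance

-- ===== CLAIM (what is proved, stated in full; the proofs are below) =====
def Claim_equal_find_valid_sequences : Prop := ∀ (triangle : List (List Int)), Dom_find_valid_sequences triangle → Spec_find_valid_sequences triangle (find_valid_sequences triangle)

-- ===== LEMMAS AND PROOFS =====

def run_str (a b : Int) : String :=
  PySem.Str.join "" ((PySem.List.pyRange a b 1).map PySem.Int.toStr)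

def ascL (s : Int) (m : Nat) : List Int := (List.range m).map (fun k : Nat => s + (k : Int))
def descL (s : Int) (m : Nat) : List Int := (List.range m).map (fun k : Nat => s - (k : Int))

theorem asc_cons (s : Int) (m : Nat) : s :: ascL (s + 1) m = ascL s (m + 1) := by
  unfold ascL
  rw [List.range_succ_eq_map, List.map_cons, List.map_map]
  refine List.cons_eq_cons.2 ⟨by norm_num, ?_⟩
  exact (List.map_congr_left fun k _ => by simp [Function.comp]; ring).symm

theorem desc_cons (s : Int) (m : Nat) : s :: descL (s - 1) m = descL s (m + 1) := by
  unfold descL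
  rw [List.range_succ_eq_map, List.map_cons, List.map_map]
  refine List.cons_eq_cons.2 ⟨by norm_num, ?_⟩
  exact (List.map_congr_left fun k _ => by simp [Function.comp]; ring).symm

theorem asc_snoc (s : Int) (m : Nat) : ascL s (m + 1) = ascL s m ++ [s + (m : Int)] := by
  unfold ascL
  rw [List.range_succ, List.map_append, List.map_cons, List.map_nil]

theorem asc_dropLast (s : Int) (m : Nat) : (ascL s (m + 1)).dropLast = ascL s m := by
  rw [asc_snoc]
  exact List.dropLast_concat

theorem asc_tail (s : Int) (m : Nat) : (ascL s (m + 1)).tail = ascL (s + 1) m := by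
  rw [← asc_cons, List.tail_cons]

theorem build_up (n : Nat) : ∀ (s : Int) (u : PySem.Set Int), (s - 1) ∈ u → (∀ x ∈ u, x ≤ s) →
    build_sequences s (n + 1) u =
      if n = 0 ∨ (-1 ≤ s ∧ s + n ≤ 76) then [ascL s (n + 1)] else [] := by
  induction n with
  | zero =>
    intro s u h1 h2
    simp [build_sequences, ascL]
  | succ m ih =>
    intro s u h1 h2
    show build_sequences s (m + 2) u = _
    rw [build_sequences]
    by_cases hb : -1 ≤ s ∧ s + 1 ≤ 76
    · rw [if_pos ⟨by omega, by omega, fun hm => by have := h2 _ hm; omega⟩,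
        if_neg (fun h => h.2.2 h1)]
      rw [ih (s + 1) (PySem.Set.add u s) (by simp [PySem.Set.mem_add])
        (fun x hx => by rcases (PySem.Set.mem_add _ _ _).1 hx with h | h
                        · have := h2 _ h; omega
                        · omega)]
      obtain ⟨hb1, hb2⟩ := hb
      by_cases hc : m = 0 ∨ (-1 ≤ s + 1 ∧ s + 1 + m ≤ 76)
      · rcases hc with hc | hc
        · rw [if_pos (Or.inl hc), if_pos (by subst hc; push_cast; omega)]
          simp [asc_cons]
        · rw [if_pos (Or.inr hc), if_pos (by right; push_cast; omega)]
          simp [asc_cons]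
      · rw [if_neg hc]
        rw [if_neg (by omega)]
        simp
    · rw [if_neg (fun h => hb ⟨by omega, by omega⟩), if_neg (fun h => h.2.2 h1)]
      rw [if_neg (by simp only [not_and_or, not_le] at hb ⊢; omega)]
      simp

theorem build_down (n : Nat) : ∀ (s : Int) (u : PySem.Set Int), (s + 1) ∈ u → (∀ x ∈ u, s ≤ x) →
    build_sequences s (n + 1) u =
      if n = 0 ∨ (0 ≤ s - n ∧ s ≤ 77) then [descL s (n + 1)] else [] := by
  induction n with
  | zero =>
    intro s u h1 h2
    simp [build_sequences, descL]
  | succ m ih =>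
    intro s u h1 h2
    show build_sequences s (m + 2) u = _
    rw [build_sequences]
    by_cases hb : 0 ≤ s - 1 ∧ s - 1 ≤ 76
    · rw [if_neg (fun h => h.2.2 h1),
        if_pos ⟨by omega, by omega, fun hm => by have := h2 _ hm; omega⟩]
      rw [ih (s - 1) (PySem.Set.add u s) (by simp [PySem.Set.mem_add])
        (fun x hx => by rcases (PySem.Set.mem_add _ _ _).1 hx with h | h
                        · have := h2 _ h; omega
                        · omega)]
      obtain ⟨hb1, hb2⟩ := hb
      by_cases hc : m = 0 ∨ (0 ≤ s - 1 - m ∧ s - 1 ≤ 77)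
      · rcases hc with hc | hc
        · rw [if_pos (Or.inl hc), if_pos (by subst hc; simp; omega)]
          simp [desc_cons]
        · rw [if_pos (Or.inr hc), if_pos (by right; constructor <;> omega)]
          simp [desc_cons]
      · rw [if_neg hc, if_neg (by omega)]
        simp
    · rw [if_neg (fun h => h.2.2 h1), if_neg (fun h => hb ⟨by omega, by omega⟩)]
      rw [if_neg (by simp only [not_and_or, not_le] at hb ⊢; omega)]
      simp

theorem build_top (s : Int) (n : Nat) :
    build_sequences s (n + 2) PySem.Set.empty =
      (if -1 ≤ s ∧ s + ((n : Int) + 1) ≤ 76 then [ascL s (n + 2)] else []) ++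
      (if 0 ≤ s - ((n : Int) + 1) ∧ s ≤ 77 then [descL s (n + 2)] else []) := by
  rw [build_sequences]
  congr 1
  · by_cases hb : 0 ≤ s + 1 ∧ s + 1 ≤ 76
    · rw [if_pos ⟨hb.1, hb.2, by simp [PySem.Set.empty]⟩]
      rw [build_up n (s + 1) (PySem.Set.add PySem.Set.empty s)
        (by simp) (fun x hx => by
          rcases (PySem.Set.mem_add _ _ _).1 hx with h | h
          · simp [PySem.Set.empty] at h
          · omega)]
      by_cases hc : n = 0 ∨ (-1 ≤ s + 1 ∧ s + 1 + n ≤ 76)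
      · rcases hc with hc | hc
        · rw [if_pos (Or.inl hc), if_pos (by subst hc; simp; omega)]
          simp [asc_cons]
        · rw [if_pos (Or.inr hc), if_pos (by constructor <;> omega)]
          simp [asc_cons]
      · rw [if_neg hc, if_neg (by omega)]
        simp
    · rw [if_neg (fun h => hb ⟨h.1, h.2.1⟩)]
      rw [if_neg (by simp only [not_and_or, not_le] at hb ⊢; omega)]
  · by_cases hb : 0 ≤ s - 1 ∧ s - 1 ≤ 76
    · rw [if_pos ⟨hb.1, hb.2, by simp [PySem.Set.empty]⟩]
      rw [build_down n (s - 1) (PySem.Set.add PySem.Set.empty s)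
        (by simp) (fun x hx => by
          rcases (PySem.Set.mem_add _ _ _).1 hx with h | h
          · simp [PySem.Set.empty] at h
          · omega)]
      by_cases hc : n = 0 ∨ (0 ≤ s - 1 - n ∧ s - 1 ≤ 77)
      · rcases hc with hc | hc
        · rw [if_pos (Or.inl hc), if_pos (by subst hc; simp; omega)]
          simp [desc_cons]
        · rw [if_pos (Or.inr hc), if_pos (by constructor <;> omega)]
          simp [desc_cons]
      · rw [if_neg hc, if_neg (by omega)]
        simp
    · rw [if_neg (fun h => hb ⟨h.1, h.2.1⟩)]
      rw [if_neg (by simp only [not_and_or, not_le] at hb ⊢; omega)]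

theorem asc_pairwise_lt (s : Int) (m : Nat) : (ascL s m).Pairwise (· < ·) := by
  exact List.Pairwise.map _ (fun a b h => by omega) (List.pairwise_lt_range)

theorem desc_reverse (s : Int) (m : Nat) : (descL s m).reverse = ascL (s - m + 1) m := by
  apply List.ext_getElem
  · simp [descL, ascL]
  · intro i h1 h2
    simp only [descL, ascL, List.getElem_reverse, List.getElem_map, List.getElem_range]
    simp only [descL, List.length_reverse, List.length_map, List.length_range] at h1
    have : ((List.range m).map (fun k : Nat => s - (k : Int))).length = m := by simp
    have hi : i < m := by simpa [ascL] using h2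
    rw [this]
    omega

theorem sortJoin_asc (s : Int) (m : Nat) :
    PySem.Str.join "" ((PySem.List.sorted (ascL s m) (fun x => x) false).map PySem.Int.toStr)
      = PySem.Str.join "" ((ascL s m).map PySem.Int.toStr) := by
  rw [PySem.List.sorted_eq_self_of_pairwise _ _ ((asc_pairwise_lt s m).imp le_of_lt)]

theorem sortJoin_desc (s : Int) (m : Nat) :
    PySem.Str.join "" ((PySem.List.sorted (descL s m) (fun x => x) false).map PySem.Int.toStr)
      = PySem.Str.join "" ((ascL (s - m + 1) m).map PySem.Int.toStr) := by
  rw [PySem.List.sorted_eq_of_perm_of_pairwise_lt _ _ _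
    (by rw [← desc_reverse s m]; exact (descL s m).reverse_perm)
    (asc_pairwise_lt (s - m + 1) m)]

theorem pyRange_asc (a : Int) (m : Nat) :
    PySem.List.pyRange a (a + (m : Int)) 1 = ascL a m := by
  rw [PySem.List.pyRange_one]
  have h : a + (m : Int) - a = (m : Int) := by ring
  rw [h, Int.toNat_natCast]
  rfl

theorem run_str_asc (a : Int) (m : Nat) :
    run_str a (a + m) = PySem.Str.join "" ((ascL a m).map PySem.Int.toStr) := by
  unfold run_str
  rw [pyRange_asc]

theorem asc_all (a : Int) (m : Nat) :
    ((ascL a (m + 1)).all (fun r => decide (0 ≤ r) && decide (r ≤ 76)))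
      = decide (0 ≤ a ∧ a + (m : Int) ≤ 76) := by
  rw [Bool.eq_iff_iff]
  simp only [List.all_eq_true, ascL, List.forall_mem_map, List.mem_range,
    Bool.and_eq_true, decide_eq_true_eq]
  constructor
  · intro h
    have h0 := h 0 (by omega)
    have hm := h m (by omega)
    push_cast at h0 hm ⊢
    omega
  · intro h k hk
    constructor <;> omega

-- A's per-length fold, characterised by the run it is forced to yield
theorem per_len (s : Int) (n : Nat) (L : Int) (hL : (n : Int) + 2 = L) (hs : s ≤ 76)
    (acc : PySem.Set String) :
    (build_sequences s (n + 2) PySem.Set.empty).foldl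
        (fun t seq => PySem.Set.add t (PySem.Str.join ""
          ((PySem.List.sorted seq (fun x => x) false).map PySem.Int.toStr))) acc =
      (let acc1 := if -1 ≤ s ∧ s + L - 1 ≤ 76 then PySem.Set.add acc (run_str s (s + L)) else acc
       if 0 ≤ s - L + 1 then PySem.Set.add acc1 (run_str (s - L + 1) (s + 1)) else acc1) := by
  rw [build_top s n, List.foldl_append]
  have hA : run_str s (s + L) = PySem.Str.join "" ((ascL s (n + 2)).map PySem.Int.toStr) := by
    rw [← run_str_asc s (n + 2)]
    congr 1
    push_cast
    omega
  have hD : run_str (s - L + 1) (s + 1)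
      = PySem.Str.join "" ((ascL (s - (n + 2 : Nat) + 1) (n + 2)).map PySem.Int.toStr) := by
    rw [show s - L + 1 = s - ((n + 2 : Nat) : Int) + 1 by push_cast; omega]
    rw [show s + 1 = (s - ((n + 2 : Nat) : Int) + 1) + ((n + 2 : Nat) : Int) by push_cast; omega]
    exact run_str_asc _ _
  by_cases h1 : -1 ≤ s ∧ s + ((n : Int) + 1) ≤ 76 <;>
    by_cases h2 : 0 ≤ s - ((n : Int) + 1) ∧ s ≤ 77
  · obtain ⟨h1a, h1b⟩ := h1
    obtain ⟨h2a, h2b⟩ := h2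
    have hc1 : -1 ≤ s ∧ s + L - 1 ≤ 76 := ⟨h1a, by omega⟩
    have hc2 : 0 ≤ s - L + 1 := by omega
    rw [if_pos ⟨h1a, h1b⟩, if_pos ⟨h2a, h2b⟩]
    simp only [List.foldl_cons, List.foldl_nil]
    rw [if_pos hc1, if_pos hc2, sortJoin_asc, sortJoin_desc, hA, hD]
  · obtain ⟨h1a, h1b⟩ := h1
    have h2a : ¬ (0 ≤ s - ((n : Int) + 1)) := fun hh => h2 ⟨hh, by omega⟩
    have hc1 : -1 ≤ s ∧ s + L - 1 ≤ 76 := ⟨h1a, by omega⟩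
    have hc2 : ¬ (0 ≤ s - L + 1) := fun hh => h2a (by omega)
    rw [if_pos ⟨h1a, h1b⟩, if_neg h2]
    simp only [List.foldl_cons, List.foldl_nil]
    rw [if_pos hc1, if_neg hc2, sortJoin_asc, hA]
  · obtain ⟨h2a, h2b⟩ := h2
    have h1a : ¬ (-1 ≤ s ∧ s + ((n : Int) + 1) ≤ 76) := h1
    have hc1 : ¬ (-1 ≤ s ∧ s + L - 1 ≤ 76) := fun hh => h1 ⟨hh.1, by omega⟩
    have hc2 : 0 ≤ s - L + 1 := by omega
    rw [if_neg h1a, if_pos ⟨h2a, h2b⟩]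
    simp only [List.foldl_cons, List.foldl_nil]
    rw [if_neg hc1, if_pos hc2, sortJoin_desc, hD]
  · have hc1 : ¬ (-1 ≤ s ∧ s + L - 1 ≤ 76) := fun hh => h1 ⟨hh.1, by omega⟩
    have hc2 : ¬ (0 ≤ s - L + 1) := fun hh => h2 ⟨by omega, by omega⟩
    rw [if_neg h1, if_neg h2]
    simp only [List.foldl_nil]
    rw [if_neg hc1, if_neg hc2]

-- B's per-length step agrees with the same characterisation
theorem alt_len (s L : Int) (n : Nat) (hL : (n : Int) + 2 = L) (hs : s ≤ 76)
    (acc : PySem.Set String) :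
    (let up := PySem.List.pyRange s (s + L) 1
     let acc1 :=
       if (PySem.List.slice up (some 1) none).all
           (fun r => decide (0 ≤ r) && decide (r ≤ 76)) then
         PySem.Set.add acc (PySem.Str.join "" (up.map PySem.Int.toStr))
       else acc
     let down := PySem.List.pyRange (s - L + 1) (s + 1) 1
     if (PySem.List.slice down none (some (-1))).all
         (fun r => decide (0 ≤ r) && decide (r ≤ 76)) then
       PySem.Set.add acc1 (PySem.Str.join "" (down.map PySem.Int.toStr))
     else acc1) =
      (let acc1 := if -1 ≤ s ∧ s + L - 1 ≤ 76 then PySem.Set.add acc (run_str s (s + L)) else acc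
       if 0 ≤ s - L + 1 then PySem.Set.add acc1 (run_str (s - L + 1) (s + 1)) else acc1) := by
  have hup : PySem.List.pyRange s (s + L) 1 = ascL s (n + 2) := by
    rw [show s + L = s + ((n + 2 : Nat) : Int) by push_cast; omega]
    exact pyRange_asc s (n + 2)
  have hdown : PySem.List.pyRange (s - L + 1) (s + 1) 1 = ascL (s - L + 1) (n + 2) := by
    rw [show s + 1 = (s - L + 1) + ((n + 2 : Nat) : Int) by push_cast; omega]
    exact pyRange_asc _ _
  simp only [hup, hdown, PySem.List.slice_from_one, PySem.List.slice_to_neg_one,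
    asc_tail, asc_dropLast, asc_all]
  have hr1 : run_str s (s + L) = PySem.Str.join "" (List.map PySem.Int.toStr (ascL s (n + 2))) := by
    unfold run_str
    rw [hup]
  have hr2 : run_str (s - L + 1) (s + 1)
      = PySem.Str.join "" (List.map PySem.Int.toStr (ascL (s - L + 1) (n + 2))) := by
    unfold run_str
    rw [hdown]
  have e1 : (0 ≤ s + 1 ∧ s + 1 + (n : Int) ≤ 76) ↔ (-1 ≤ s ∧ s + L - 1 ≤ 76) := by omega
  have e2 : (0 ≤ s - L + 1 ∧ s - L + 1 + (n : Int) ≤ 76) ↔ (0 ≤ s - L + 1) := by omega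
  simp only [decide_eq_true_eq, e1, e2, hr1, hr2]

theorem lengths_eq (s : Int) (hs : s ≤ 76) (acc : PySem.Set String) :
    ([3, 7, 11, 13] : List Nat).foldl
        (fun t length => (build_sequences s length PySem.Set.empty).foldl
          (fun t seq => PySem.Set.add t (PySem.Str.join ""
            ((PySem.List.sorted seq (fun x => x) false).map PySem.Int.toStr))) t) acc =
      ([3, 7, 11, 13] : List Int).foldl
        (fun t length =>
          let up := PySem.List.pyRange s (s + length) 1
          let acc1 :=
            if (PySem.List.slice up (some 1) none).all
                (fun r => decide (0 ≤ r) && decide (r ≤ 76)) then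
              PySem.Set.add t (PySem.Str.join "" (up.map PySem.Int.toStr))
            else t
          let down := PySem.List.pyRange (s - length + 1) (s + 1) 1
          if (PySem.List.slice down none (some (-1))).all
              (fun r => decide (0 ≤ r) && decide (r ≤ 76)) then
            PySem.Set.add acc1 (PySem.Str.join "" (down.map PySem.Int.toStr))
          else acc1) acc := by
  simp only [List.foldl_cons, List.foldl_nil]
  rw [per_len s 1 3 (by norm_num) hs, alt_len s 3 1 (by norm_num) hs]
  rw [per_len s 5 7 (by norm_num) hs, alt_len s 7 5 (by norm_num) hs]
  rw [per_len s 9 11 (by norm_num) hs, alt_len s 11 9 (by norm_num) hs]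
  rw [per_len s 11 13 (by norm_num) hs, alt_len s 13 11 (by norm_num) hs]

def strsList (s : Int) : List String :=
  (if -1 ≤ s ∧ s + 3 - 1 ≤ 76 then [run_str s (s + 3)] else []) ++
  (if 0 ≤ s - 3 + 1 then [run_str (s - 3 + 1) (s + 1)] else []) ++
  (if -1 ≤ s ∧ s + 7 - 1 ≤ 76 then [run_str s (s + 7)] else []) ++
  (if 0 ≤ s - 7 + 1 then [run_str (s - 7 + 1) (s + 1)] else []) ++
  (if -1 ≤ s ∧ s + 11 - 1 ≤ 76 then [run_str s (s + 11)] else []) ++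
  (if 0 ≤ s - 11 + 1 then [run_str (s - 11 + 1) (s + 1)] else []) ++
  (if -1 ≤ s ∧ s + 13 - 1 ≤ 76 then [run_str s (s + 13)] else []) ++
  (if 0 ≤ s - 13 + 1 then [run_str (s - 13 + 1) (s + 1)] else [])

theorem set_foldl_add_if {α : Type} [BEq α] (c : Prop) [Decidable c] (x : α) (t : PySem.Set α) :
    List.foldl PySem.Set.add t (if c then [x] else []) = if c then PySem.Set.add t x else t := by
  split <;> rfl

theorem astep_eq (s : Int) (n : Nat) (L : Int) (hL : (n : Int) + 2 = L) (hs : s ≤ 76)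
    (acc : PySem.Set String) :
    (build_sequences s (n + 2) PySem.Set.empty).foldl
        (fun t seq => PySem.Set.add t (PySem.Str.join ""
          ((PySem.List.sorted seq (fun x => x) false).map PySem.Int.toStr))) acc =
      List.foldl PySem.Set.add acc
        ((if -1 ≤ s ∧ s + L - 1 ≤ 76 then [run_str s (s + L)] else []) ++
         (if 0 ≤ s - L + 1 then [run_str (s - L + 1) (s + 1)] else [])) := by
  rw [per_len s n L hL hs acc, List.foldl_append, set_foldl_add_if, set_foldl_add_if]

theorem bstep_eq (s : Int) (hs : s ≤ 76) (acc : PySem.Set String) :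
    ([3, 7, 11, 13] : List Nat).foldl
        (fun t length => (build_sequences s length PySem.Set.empty).foldl
          (fun t seq => PySem.Set.add t (PySem.Str.join ""
            ((PySem.List.sorted seq (fun x => x) false).map PySem.Int.toStr))) t) acc =
      List.foldl PySem.Set.add acc (strsList s) := by
  simp only [List.foldl_cons, List.foldl_nil]
  rw [astep_eq s 1 3 (by norm_num) hs, astep_eq s 5 7 (by norm_num) hs,
    astep_eq s 9 11 (by norm_num) hs, astep_eq s 11 13 (by norm_num) hs]
  simp only [strsList, List.foldl_append]

theorem subset_foldl_add {α : Type} [BEq α] [LawfulBEq α] (xs : List α) (t : PySem.Set α)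
    (h : ∀ x ∈ xs, x ∈ t) : List.foldl PySem.Set.add t xs = t := by
  induction xs generalizing t with
  | nil => rfl
  | cons x xs ih =>
    simp only [List.foldl_cons]
    rw [PySem.Set.add_of_mem (h x List.mem_cons_self)]
    exact ih t fun y hy => h y (List.mem_cons_of_mem _ hy)

theorem mem_foldl_add {α : Type} [BEq α] [LawfulBEq α] (xs : List α) (t : PySem.Set α) (x : α)
    (h : x ∈ xs ∨ x ∈ t) : x ∈ List.foldl PySem.Set.add t xs := by
  induction xs generalizing t with
  | nil => simpa using h.resolve_left (by simp)
  | cons y ys ih =>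
    simp only [List.foldl_cons]
    rcases h with h | h
    · rcases List.mem_cons.1 h with h | h
      · exact ih _ (Or.inr ((PySem.Set.mem_add _ _ _).2 (Or.inr h)))
      · exact ih _ (Or.inl h)
    · exact ih _ (Or.inr ((PySem.Set.mem_add _ _ _).2 (Or.inl h)))

theorem lengths_idem (s : Int) (hs : s ≤ 76) (acc : PySem.Set String) :
    ([3, 7, 11, 13] : List Nat).foldl
        (fun t length => (build_sequences s length PySem.Set.empty).foldl
          (fun t seq => PySem.Set.add t (PySem.Str.join ""
            ((PySem.List.sorted seq (fun x => x) false).map PySem.Int.toStr))) t)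
      (([3, 7, 11, 13] : List Nat).foldl
        (fun t length => (build_sequences s length PySem.Set.empty).foldl
          (fun t seq => PySem.Set.add t (PySem.Str.join ""
            ((PySem.List.sorted seq (fun x => x) false).map PySem.Int.toStr))) t) acc) =
      ([3, 7, 11, 13] : List Nat).foldl
        (fun t length => (build_sequences s length PySem.Set.empty).foldl
          (fun t seq => PySem.Set.add t (PySem.Str.join ""
            ((PySem.List.sorted seq (fun x => x) false).map PySem.Int.toStr))) t) acc := by
  rw [bstep_eq s hs, bstep_eq s hs]
  exact subset_foldl_add _ _ fun x hx => mem_foldl_add _ _ _ (Or.inl hx)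

theorem row_repeat (s : Int) (hs : s ≤ 76) (m : Nat) (acc : PySem.Set String) :
    (PySem.List.pyRange 0 (m : Int) 1).foldl
        (fun t _ => ([3, 7, 11, 13] : List Nat).foldl
          (fun t length => (build_sequences s length PySem.Set.empty).foldl
            (fun t seq => PySem.Set.add t (PySem.Str.join ""
              ((PySem.List.sorted seq (fun x => x) false).map PySem.Int.toStr))) t) t) acc =
      if m = 0 then acc
      else ([3, 7, 11, 13] : List Nat).foldl
          (fun t length => (build_sequences s length PySem.Set.empty).foldl
            (fun t seq => PySem.Set.add t (PySem.Str.join ""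
              ((PySem.List.sorted seq (fun x => x) false).map PySem.Int.toStr))) t) acc := by
  induction m with
  | zero =>
    rw [if_pos rfl]
    rw [show ((0 : Nat) : Int) = 0 by norm_num, PySem.List.pyRange_one_eq_nil le_rfl]
    rfl
  | succ k ih =>
    rw [show ((k + 1 : Nat) : Int) = (k : Int) + 1 by push_cast; ring,
      PySem.List.pyRange_one_succ_right (by positivity), List.foldl_append, ih]
    by_cases hk : k = 0
    · subst hk
      rw [if_pos rfl, if_neg (Nat.succ_ne_zero 0)]
      simp only [List.foldl_cons, List.foldl_nil]
    · rw [if_neg hk, if_neg (Nat.succ_ne_zero k)]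
      simp only [List.foldl_cons, List.foldl_nil]
      exact lengths_idem s hs acc

theorem main_eq (triangle : List (List Int)) : ∀ (i : Int) (acc : PySem.Set String), 0 ≤ i →
    (PySem.List.enumerate triangle i).foldl
      (fun unique_sequences p =>
        (PySem.List.pyRange 0 (p.2.length : Int) 1).foldl
          (fun unique_sequences _col_idx =>
            ([3, 7, 11, 13] : List Nat).foldl
              (fun unique_sequences length =>
                (build_sequences (76 - p.1) length PySem.Set.empty).foldl
                  (fun unique_sequences seq =>
                    PySem.Set.add unique_sequences
                      (PySem.Str.join ""
                        ((PySem.List.sorted seq (fun x => x) false).map PySem.Int.toStr)))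
                  unique_sequences)
              unique_sequences)
          unique_sequences) acc =
    (PySem.List.enumerate triangle i).foldl
      (fun acc p =>
        if p.2 = [] then acc
        else
          ([3, 7, 11, 13] : List Int).foldl
            (fun acc length =>
              let up := PySem.List.pyRange (76 - p.1) ((76 - p.1) + length) 1
              let acc1 :=
                if (PySem.List.slice up (some 1) none).all
                    (fun r => decide (0 ≤ r) && decide (r ≤ 76)) then
                  PySem.Set.add acc (PySem.Str.join "" (up.map PySem.Int.toStr))
                else acc
              let down := PySem.List.pyRange ((76 - p.1) - length + 1) ((76 - p.1) + 1) 1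
              if (PySem.List.slice down none (some (-1))).all
                  (fun r => decide (0 ≤ r) && decide (r ≤ 76)) then
                PySem.Set.add acc1 (PySem.Str.join "" (down.map PySem.Int.toStr))
              else acc1)
            acc) acc := by
  induction triangle with
  | nil => intro i acc _; rfl
  | cons row rest ih =>
    intro i acc hi
    rw [PySem.List.enumerate_cons]
    rw [List.foldl_cons (l := PySem.List.enumerate rest (i + 1))]
    rw [List.foldl_cons (l := PySem.List.enumerate rest (i + 1))]
    rw [ih (i + 1) _ (by omega)]
    congr 1
    show (PySem.List.pyRange 0 (row.length : Int) 1).foldl _ acc = _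
    rw [row_repeat (76 - i) (by omega) row.length acc]
    by_cases hrow : row = []
    · subst hrow
      rw [if_pos rfl]
      simp
    · rw [if_neg (by simpa [List.length_eq_zero_iff] using hrow),
        if_neg hrow]
      exact lengths_eq (76 - i) (by omega) acc

-- ===== VERDICT (by name: the statement is the Claim_ definition above) =====
theorem find_valid_sequences_spec : Claim_equal_find_valid_sequences := by
  intro triangle _
  unfold Spec_find_valid_sequences find_valid_sequences find_valid_sequences_alt
  exact main_eq triangle 0 PySem.Set.empty le_rfl
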